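-- pv_equiv track=rewrite | github.com/kurazhv1/Y2_Project_Python_Reservation_System | src/check_reservation.py | check_date_format
-- ===== SOURCE A (Python) =====
-- def check_date_format(datein, dateout):
--     list1 = datein.split(".")
--     list2 = dateout.split(".")
--     if len(list1)!=3:
--         return False
--     if len(list2)!=3:
--         return False
--     try:
--         list1 = [int(i) for i in list1]
--         list2 = [int(i) for i in list2]
--         if list1[0] > 31 or list1[0] < 1 or list2[0] > 31 or list2[0] < 1 \
--                 or list1[1] > 12 or list1[1] < 1 or list2[1] > 12 or list2[1] < 1\
--                 or list1[2] < 2022 or list2[2] < 2022 or list2[2] < list1[2]\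
--                 or (list1[2] == list2[2] and list1[1] == list2[1] and list1[0] > list2[0])\
--                 or (list1[2] == list2[2] and list1[1] > list2[1]):
--             return False
--         else:
--             return True
--     except:
--         return False
-- ===== SOURCE B (Python) =====
-- def _key(s):
--     """Encode a valid 'd.m.y' string as one mixed-radix integer, else None."""
--     parts = s.split(".")
--     if len(parts) != 3:
--         return None
--     try:
--         vals = [int(p) for p in parts]
--     except ValueError:
--         return None
--     for v, lo, hi in zip(vals, (1, 1, 2022), (31, 12, None)):
--         if v < lo or (hi is not None and v > hi):
--             return None
--     d, m, y = vals
--     return (y * 13 + m) * 32 + d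
--
-- def check_date_format(datein, dateout):
--     k1 = _key(datein)
--     k2 = _key(dateout)
--     return k1 is not None and k2 is not None and k1 <= k2
-- ===== Notes on version B (the rewrite author's own statement) =====
-- stated objective: alternative
-- what changed: B encodes each valid date as a single mixed-radix integer key (y*13+m)*32+d via a helper whose range checks are a data-driven loop over a bounds table, and decides the ordering by one arithmetic comparison of the two keys, replacing A's monolithic thirteen-clause chained boolean over two parallel lists.
import Mathlib
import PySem

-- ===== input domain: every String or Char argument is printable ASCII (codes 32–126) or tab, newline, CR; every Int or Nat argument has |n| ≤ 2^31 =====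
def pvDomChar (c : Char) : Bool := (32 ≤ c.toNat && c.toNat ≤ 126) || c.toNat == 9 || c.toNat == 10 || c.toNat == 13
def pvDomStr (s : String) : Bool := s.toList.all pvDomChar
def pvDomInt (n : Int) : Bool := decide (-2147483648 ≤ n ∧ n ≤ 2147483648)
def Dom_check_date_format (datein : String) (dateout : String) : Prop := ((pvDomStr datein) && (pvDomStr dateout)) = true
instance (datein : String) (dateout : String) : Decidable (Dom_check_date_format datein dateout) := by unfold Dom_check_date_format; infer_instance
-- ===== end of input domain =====

-- B encodes each valid date as one mixed-radix integer key and compares the two keys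
-- arithmetically, replacing A's chained thirteen-clause boolean; objective: alternative.

-- ===== PORT A =====
def check_date_format (datein : String) (dateout : String) : Bool :=
  let list1 := PySem.Chars.splitOn datein.toList ['.']
  let list2 := PySem.Chars.splitOn dateout.toList ['.']
  if list1.length ≠ 3 then false
  else if list2.length ≠ 3 then false
  else
    -- try-block: int() on every piece; ValueError → except → False
    match list1.mapM PySem.Int.ofChars?, list2.mapM PySem.Int.ofChars? with
    | some [d1, m1, y1], some [d2, m2, y2] =>
        if d1 > 31 || d1 < 1 || d2 > 31 || d2 < 1
           || m1 > 12 || m1 < 1 || m2 > 12 || m2 < 1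
           || y1 < 2022 || y2 < 2022 || y2 < y1
           || (y1 == y2 && m1 == m2 && d1 > d2)
           || (y1 == y2 && m1 > m2) then false else true
    | _, _ => false

-- ===== PORT B =====
-- helper _key: split, int() each part, bounds-table loop, mixed-radix encoding
def dateKey (s : String) : Option Int :=
  let parts := PySem.Chars.splitOn s.toList ['.']
  if parts.length ≠ 3 then none
  else
    (parts.mapM PySem.Int.ofChars?).bind fun vals =>
      -- for v, lo, hi in zip(vals, (1,1,2022), (31,12,None)): early return None on violation
      if (vals.zip [((1:Int), some (31:Int)), (1, some 12), (2022, none)]).all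
           (fun p => decide (p.2.1 ≤ p.1) && (p.2.2.elim true (fun hi => decide (p.1 ≤ hi)))) then
        -- d, m, y = vals (vals has exactly 3 elements here)
        some ((vals.getD 2 0 * 13 + vals.getD 1 0) * 32 + vals.getD 0 0)
      else none

-- 'k1 is not None and k2 is not None and k1 <= k2' as Option bind/map with default false
def check_date_format_alt (datein : String) (dateout : String) : Bool :=
  ((dateKey datein).bind fun k1 => (dateKey dateout).map fun k2 => decide (k1 ≤ k2)).getD false

-- ===== PRECONDITION & SPEC =====
def Spec_check_date_format (datein : String) (dateout : String) (out : Bool) : Prop := out = check_date_format_alt datein dateout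
instance (datein : String) (dateout : String) (out : Bool) : Decidable (Spec_check_date_format datein dateout out) := by unfold Spec_check_date_format; infer_instance

-- ===== CLAIM (what is proved, stated in full; the proofs are below) =====
def Claim_equal_check_date_format : Prop := ∀ (datein : String) (dateout : String), Dom_check_date_format datein dateout → Spec_check_date_format datein dateout (check_date_format datein dateout)

-- ===== LEMMAS AND PROOFS =====

-- ===== VERDICT =====
set_option maxHeartbeats 2000000 in
theorem check_date_format_spec : Claim_equal_check_date_format := by
  intro din dout _
  unfold Spec_check_date_format check_date_format check_date_format_alt dateKey
  rcases h1 : PySem.Chars.splitOn din.toList ['.'] with _ | ⟨a1, _ | ⟨b1, _ | ⟨c1, _ | ⟨d1, t1⟩⟩⟩⟩ <;>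
    rcases h2 : PySem.Chars.splitOn dout.toList ['.'] with _ | ⟨a2, _ | ⟨b2, _ | ⟨c2, _ | ⟨d2, t2⟩⟩⟩⟩ <;>
    simp [List.mapM_cons, List.mapM_nil, Option.bind, Option.getD, List.getD]
  -- list1 has 3 parts, list2 has 0, 1 or 2: both sides false
  · rcases PySem.Int.ofChars? a1 with _ | x1 <;>
    rcases PySem.Int.ofChars? b1 with _ | y1 <;>
    rcases PySem.Int.ofChars? c1 with _ | z1 <;>
    simp [List.zip, List.zipWith, List.all] <;> split_ifs <;> simp
  · rcases PySem.Int.ofChars? a1 with _ | x1 <;>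
    rcases PySem.Int.ofChars? b1 with _ | y1 <;>
    rcases PySem.Int.ofChars? c1 with _ | z1 <;>
    simp [List.zip, List.zipWith, List.all] <;> split_ifs <;> simp
  · rcases PySem.Int.ofChars? a1 with _ | x1 <;>
    rcases PySem.Int.ofChars? b1 with _ | y1 <;>
    rcases PySem.Int.ofChars? c1 with _ | z1 <;>
    simp [List.zip, List.zipWith, List.all] <;> split_ifs <;> simp
  -- both have 3 parts: the real case
  · rcases PySem.Int.ofChars? a1 with _ | x1 <;>
    rcases PySem.Int.ofChars? b1 with _ | y1 <;>
    rcases PySem.Int.ofChars? c1 with _ | z1 <;>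
    rcases PySem.Int.ofChars? a2 with _ | x2 <;>
    rcases PySem.Int.ofChars? b2 with _ | y2 <;>
    rcases PySem.Int.ofChars? c2 with _ | z2 <;>
    simp [List.zip, List.zipWith, List.all] <;>
    (try (split_ifs <;> simp)) <;>
    (try (rw [Bool.eq_iff_iff]; simp)) <;> omega
  -- list2 has ≥4 parts: both sides false
  · rcases PySem.Int.ofChars? a1 with _ | x1 <;>
    rcases PySem.Int.ofChars? b1 with _ | y1 <;>
    rcases PySem.Int.ofChars? c1 with _ | z1 <;>
    simp [List.zip, List.zipWith, List.all] <;> split_ifs <;> simp
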